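-- pv_equiv track=rewrite | github.com/Eng-Elias/codetective | codetective/agents/output/edit_agent.py | _extract_largest_code_block
-- ===== SOURCE A (Python) =====
-- def _extract_largest_code_block(response: str) -> str:
--     """Extract the largest block that looks like code."""
--     lines = response.split('\n')
--     current_block = []
--     largest_block = []
--
--     for line in lines:
--         stripped = line.strip()
--
--         # Skip obvious non-code lines
--         if any(stripped.lower().startswith(phrase) for phrase in
--                ['here is', 'here\'s', 'the code', 'explanation', 'note:', 'i fixed', 'i changed']):
--             if len(current_block) > len(largest_block):
--                 largest_block = current_block[:]
--             current_block = []
--             continue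
--
--         # Skip markdown markers
--         if stripped.startswith('```'):
--             continue
--
--         current_block.append(line)
--
--     # Check final block
--     if len(current_block) > len(largest_block):
--         largest_block = current_block
--
--     return '\n'.join(largest_block).strip()
-- ===== SOURCE B (Python) =====
-- def _extract_largest_code_block(response: str) -> str:
--     """Extract the largest block that looks like code.
--
--     Staged pipeline instead of a stateful scan: drop markdown fence lines
--     globally (fence lines can never match a skip phrase, so this commutes
--     with splitting), compute the indices of prose separator lines, slice the
--     remaining lines between consecutive separator indices, and pick the
--     first largest slice.
--     """
--     skip = ('here is', "here's", 'the code', 'explanation', 'note:', 'i fixed', 'i changed')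
--     kept = [l for l in response.split('\n') if not l.strip().startswith('```')]
--     cuts = [i for i, l in enumerate(kept) if l.strip().lower().startswith(skip)]
--     bounds = zip([-1] + cuts, cuts + [len(kept)])
--     largest = max((kept[a + 1:b] for a, b in bounds), key=len, default=[])
--     return '\n'.join(largest).strip()
-- ===== Notes on version B (the rewrite author's own statement) =====
-- stated objective: alternative
-- what changed: B replaces A's stateful one-pass scan (current/largest accumulators updated per line with three branches) by a staged pipeline: filter fence lines out globally, compute the separator-line indices with enumerate, slice the remaining lines between consecutive separator indices, and pick the first largest slice with max(key=len); correct because a fence line can never start with a skip phrase, so dropping fences first commutes with splitting.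
import Mathlib
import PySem

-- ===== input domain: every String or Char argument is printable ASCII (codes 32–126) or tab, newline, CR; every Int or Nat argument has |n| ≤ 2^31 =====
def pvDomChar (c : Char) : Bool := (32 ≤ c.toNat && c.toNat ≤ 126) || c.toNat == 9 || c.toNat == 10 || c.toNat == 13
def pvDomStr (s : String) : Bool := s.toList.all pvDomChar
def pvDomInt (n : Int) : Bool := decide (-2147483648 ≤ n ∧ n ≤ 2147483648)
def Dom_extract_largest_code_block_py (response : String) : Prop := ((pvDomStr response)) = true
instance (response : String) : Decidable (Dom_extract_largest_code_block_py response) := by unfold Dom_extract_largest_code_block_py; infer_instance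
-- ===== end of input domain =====

-- B replaces A's stateful scan (current/largest accumulators updated per line) by a staged
-- pipeline: filter fence lines out globally, compute the separator-line indices, slice the
-- remaining lines between consecutive separator indices, pick the first largest slice.

def pvPhrases : List String :=
  ["here is", "here's", "the code", "explanation", "note:", "i fixed", "i changed"]

-- line is an "obvious non-code" separator line (the skip-phrase test both Pythons perform)
def pvSep (line : String) : Bool :=
  pvPhrases.any (fun p => PySem.Str.startswith (PySem.Str.lower (PySem.Str.strip line)) p)

-- line is a markdown fence marker (the '```' test both Pythons perform)
def pvFence (line : String) : Bool :=
  PySem.Str.startswith (PySem.Str.strip line) "```"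

-- ===== PORT A =====
-- loop body of A: state = (current_block, largest_block)
def pvStepA (s : List String × List String) (line : String) : List String × List String :=
  if pvSep line then
    ([], if s.1.length > s.2.length then s.1 else s.2)
  else if pvFence line then s
  else (s.1 ++ [line], s.2)

def extract_largest_code_block_py (response : String) : String :=
  let st := ((PySem.Str.split? response "\n").getD []).foldl pvStepA ([], [])
  let largest := if st.1.length > st.2.length then st.1 else st.2
  PySem.Str.strip (PySem.Str.join "\n" largest)

-- ===== PORT B =====
-- cuts = [i for i, l in enumerate(kept) if l.strip().lower().startswith(skip)]
def pvCuts (k : List String) : List Int :=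
  ((PySem.List.enumerate k).filter (fun p => pvSep p.2)).map (fun p => p.1)

-- [kept[a+1:b] for a, b in zip([-1] + cuts, cuts + [len(kept)])]
def pvBlocksOf (k : List String) : List (List String) :=
  (List.zip ((-1 : Int) :: pvCuts k) (pvCuts k ++ [(k.length : Int)])).map
    (fun ab => PySem.List.slice k (some (ab.1 + 1)) (some ab.2))

def extract_largest_code_block_py_alt (response : String) : String :=
  let kept := ((PySem.Str.split? response "\n").getD []).filter (fun l => !pvFence l)
  let largest := PySem.List.maxD (pvBlocksOf kept) (fun b => b.length) []
  PySem.Str.strip (PySem.Str.join "\n" largest)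

-- ===== PRECONDITION & SPEC =====
def Spec_extract_largest_code_block_py (response : String) (out : String) : Prop := out = extract_largest_code_block_py_alt response
instance (response : String) (out : String) : Decidable (Spec_extract_largest_code_block_py response out) := by unfold Spec_extract_largest_code_block_py; infer_instance

-- ===== CLAIM (what is proved, stated in full; the proofs are below) =====
def Claim_equal_extract_largest_code_block_py : Prop := ∀ (response : String), Dom_extract_largest_code_block_py response → Spec_extract_largest_code_block_py response (extract_largest_code_block_py response)

-- ===== LEMMAS AND PROOFS =====

-- 'earliest maximal' pick shared by A's final selection and Python's max(…, key=len)
def pvPick (best b : List String) : List String := if b.length > best.length then b else best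

-- single-pass segmentation of the raw lines, state = (blocks, current)
def pvStepB (s : List (List String) × List String) (line : String) : List (List String) × List String :=
  if pvSep line then (s.1 ++ [s.2], [])
  else if pvFence line then s
  else (s.1, s.2 ++ [line])

-- the same segmentation over an already fence-free list
def pvStepS (s : List (List String) × List String) (line : String) : List (List String) × List String :=
  if pvSep line then (s.1 ++ [s.2], [])
  else (s.1, s.2 ++ [line])

-- recursive split of a fence-free list at separator lines (separators removed, empties kept)
def pvSplitL : List String → List (List String)
  | [] => [[]]
  | x :: xs => if pvSep x then [] :: pvSplitL xs else (pvSplitL xs).modifyHead (x :: ·)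

-- prepend c to the head block
def pvPreApp (c : List String) (bl : List (List String)) : List (List String) :=
  bl.modifyHead (c ++ ·)

-- cuts with a general enumerate start
def pvCutsFrom (k : List String) (s : Int) : List Int :=
  ((PySem.List.enumerate k s).filter (fun p => pvSep p.2)).map (fun p => p.1)

-- the slice chain pvBlocksOf unfolds to
def pvAux (k : List String) (prev : Int) : List Int → List (List String)
  | [] => [PySem.List.slice k (some (prev + 1)) (some (k.length : Int))]
  | c :: cs => PySem.List.slice k (some (prev + 1)) (some c) :: pvAux k c cs

theorem pvSplitL_ne_nil (k : List String) : pvSplitL k ≠ [] := by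
  induction k with
  | nil => simp [pvSplitL]
  | cons x xs ih =>
    simp only [pvSplitL]
    split
    · simp
    · cases h : pvSplitL xs with
      | nil => exact absurd h ih
      | cons a t => simp [List.modifyHead]

-- fence lines never match a skip phrase
theorem pvExcl (l : String) (h : pvFence l = true) : pvSep l = false := by
  unfold pvFence at h
  unfold pvSep pvPhrases
  simp only [PySem.Str.startswith_eq] at h ⊢
  rw [PySem.Chars.startswith_iff] at h
  obtain ⟨t, ht⟩ := h
  simp only [List.any_cons, List.any_nil, Bool.or_eq_false_iff]
  rw [PySem.Str.toList_lower, ← ht]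
  simp only [PySem.Chars.lower]
  refine ⟨?_, ?_, ?_, ?_, ?_, ?_, ?_, trivial⟩ <;>
    (rw [Bool.eq_false_iff]; intro hp; rw [PySem.Chars.startswith_iff] at hp;
     obtain ⟨u, hu⟩ := hp; simp at hu; exact absurd hu.1 (by decide))

-- A's fold equals the blocks-collecting fold followed by the earliest-max pick
theorem pvMain (l : List String) (cur : List String) (blocks : List (List String)) :
    pvPick (l.foldl pvStepA (cur, blocks.foldl pvPick [])).2
           (l.foldl pvStepA (cur, blocks.foldl pvPick [])).1
      = ((l.foldl pvStepB (blocks, cur)).1 ++ [(l.foldl pvStepB (blocks, cur)).2]).foldl pvPick [] := by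
  induction l generalizing cur blocks with
  | nil => simp only [List.foldl_nil, List.foldl_append, List.foldl_cons]
  | cons line rest ih =>
    simp only [List.foldl_cons]
    by_cases hskip : pvSep line = true
    · rw [show pvStepA (cur, blocks.foldl pvPick []) line
            = ([], (blocks ++ [cur]).foldl pvPick []) by
          unfold pvStepA; rw [hskip]
          simp only [if_pos, List.foldl_append, List.foldl_cons, List.foldl_nil]
          unfold pvPick; rfl,
          show pvStepB (blocks, cur) line = (blocks ++ [cur], []) by
          unfold pvStepB; rw [hskip]; simp]
      exact ih [] (blocks ++ [cur])
    · simp only [Bool.not_eq_true] at hskip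
      by_cases hf : pvFence line = true
      · rw [show pvStepA (cur, blocks.foldl pvPick []) line = (cur, blocks.foldl pvPick []) by
            unfold pvStepA; rw [hskip, hf]; simp,
            show pvStepB (blocks, cur) line = (blocks, cur) by
            unfold pvStepB; rw [hskip, hf]; simp]
        exact ih cur blocks
      · simp only [Bool.not_eq_true] at hf
        rw [show pvStepA (cur, blocks.foldl pvPick []) line
              = (cur ++ [line], blocks.foldl pvPick []) by
            unfold pvStepA; rw [hskip, hf]; simp,
            show pvStepB (blocks, cur) line = (blocks, cur ++ [line]) by
            unfold pvStepB; rw [hskip, hf]; simp]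
        exact ih (cur ++ [line]) blocks

-- dropping fence lines first gives the fence-free segmentation
theorem pvFilter (l : List String) (s : List (List String) × List String) :
    l.foldl pvStepB s = (l.filter (fun x => !pvFence x)).foldl pvStepS s := by
  induction l generalizing s with
  | nil => simp
  | cons x xs ih =>
    by_cases hf : pvFence x = true
    · have hs := pvExcl x hf
      simp only [List.filter_cons, hf, Bool.not_true, List.foldl_cons]
      rw [show pvStepB s x = s by unfold pvStepB; rw [hs, hf]; simp]
      exact ih s
    · simp only [Bool.not_eq_true] at hf
      simp only [List.filter_cons, hf, Bool.not_false, if_pos, List.foldl_cons]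
      rw [show pvStepB s x = pvStepS s x by unfold pvStepB pvStepS; rw [hf]; simp]
      exact ih _

-- the fence-free fold computes the recursive split
theorem pvFoldS (k : List String) (bs : List (List String)) (c : List String) :
    (k.foldl pvStepS (bs, c)).1 ++ [(k.foldl pvStepS (bs, c)).2]
      = bs ++ pvPreApp c (pvSplitL k) := by
  induction k generalizing bs c with
  | nil => simp [pvSplitL, pvPreApp, List.modifyHead]
  | cons x xs ih =>
    obtain ⟨a, t, hsp⟩ : ∃ a t, pvSplitL xs = a :: t := by
      cases h : pvSplitL xs with
      | nil => exact absurd h (pvSplitL_ne_nil xs)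
      | cons a t => exact ⟨a, t, rfl⟩
    simp only [List.foldl_cons, pvSplitL]
    by_cases hs : pvSep x = true
    · rw [show pvStepS (bs, c) x = (bs ++ [c], []) by unfold pvStepS; rw [hs]; simp, ih, hs]
      simp [pvPreApp, hsp, List.modifyHead]
    · simp only [Bool.not_eq_true] at hs
      rw [show pvStepS (bs, c) x = (bs, c ++ [x]) by unfold pvStepS; rw [hs]; simp, ih, hs]
      simp [pvPreApp, hsp, List.modifyHead]

theorem pvCuts_eq (k : List String) : pvCuts k = pvCutsFrom k 0 := rfl

theorem pvCutsFrom_cons (x : String) (k : List String) (s : Int) :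
    pvCutsFrom (x :: k) s = (if pvSep x then [s] else []) ++ pvCutsFrom k (s + 1) := by
  unfold pvCutsFrom
  rw [PySem.List.enumerate_cons]
  by_cases h : pvSep x = true <;> simp [h]

theorem pvCutsFrom_shift (k : List String) (s : Int) :
    pvCutsFrom k (s + 1) = (pvCutsFrom k s).map (· + 1) := by
  induction k generalizing s with
  | nil => rfl
  | cons x xs ih =>
    rw [pvCutsFrom_cons, pvCutsFrom_cons, ih]
    by_cases h : pvSep x = true <;> simp [h]

theorem pvCutsFrom_nonneg (k : List String) (s : Int) : ∀ c ∈ pvCutsFrom k s, s ≤ c := by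
  induction k generalizing s with
  | nil => intro c hc; simp [pvCutsFrom] at hc
  | cons x xs ih =>
    intro c hc
    rw [pvCutsFrom_cons] at hc
    rcases List.mem_append.1 hc with h1 | h2
    · split at h1 <;> simp at h1; omega
    · have := ih (s + 1) c h2; omega

theorem pvSliceShift {α : Type} (x : α) (xs : List α) (a b : Int) (ha : 0 ≤ a) (hb : 0 ≤ b) :
    PySem.List.slice (x :: xs) (some (a + 1)) (some (b + 1)) = PySem.List.slice xs (some a) (some b) := by
  obtain ⟨m, rfl⟩ := Int.eq_ofNat_of_zero_le ha
  obtain ⟨n, rfl⟩ := Int.eq_ofNat_of_zero_le hb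
  have h1 : ((m : Int) + 1) = ((m + 1 : Nat) : Int) := by push_cast; ring
  have h2 : ((n : Int) + 1) = ((n + 1 : Nat) : Int) := by push_cast; ring
  rw [h1, h2, PySem.List.slice_natCast, PySem.List.slice_natCast]
  simp [List.drop_succ_cons, Nat.succ_sub_succ]

theorem pvSliceHead {α : Type} (x : α) (xs : List α) (b : Int) (hb : 0 ≤ b) :
    PySem.List.slice (x :: xs) none (some (b + 1)) = x :: PySem.List.slice xs none (some b) := by
  rw [PySem.List.slice_to (x :: xs) (by omega), PySem.List.slice_to xs hb]
  obtain ⟨n, rfl⟩ := Int.eq_ofNat_of_zero_le hb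
  rw [show ((n : Int) + 1) = ((n + 1 : Nat) : Int) by push_cast; ring]
  simp

theorem pvZipAux (k : List String) (cs : List Int) (prev : Int) :
    (List.zip (prev :: cs) (cs ++ [(k.length : Int)])).map
      (fun ab => PySem.List.slice k (some (ab.1 + 1)) (some ab.2)) = pvAux k prev cs := by
  induction cs generalizing prev with
  | nil => rfl
  | cons c cs ih => simp only [List.cons_append, List.zip_cons_cons, List.map_cons, pvAux, ih]

theorem pvAuxShift (x : String) (xs : List String) (cs : List Int) :
    ∀ prev : Int, 0 ≤ prev + 1 → (∀ c ∈ cs, 0 ≤ c) →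
    pvAux (x :: xs) (prev + 1) (cs.map (· + 1)) = pvAux xs prev cs := by
  induction cs with
  | nil =>
    intro prev hp _
    simp only [List.map_nil, pvAux]
    have hl : ((x :: xs).length : Int) = (xs.length : Int) + 1 := by simp
    rw [hl, pvSliceShift x xs (prev + 1) (xs.length : Int) hp (by positivity)]
  | cons c cs ih =>
    intro prev hp hcs
    have hc : 0 ≤ c := hcs c (List.mem_cons_self ..)
    simp only [List.map_cons, pvAux]
    rw [pvSliceShift x xs (prev + 1) c hp hc,
        ih c (by omega) (fun d hd => hcs d (List.mem_cons_of_mem _ hd))]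

-- pvBlocksOf computes the recursive split
theorem pvBlocksOf_eq (k : List String) : pvBlocksOf k = pvSplitL k := by
  induction k with
  | nil => simp [pvBlocksOf, pvCuts, pvSplitL]; rfl
  | cons x xs ih =>
    have hnn : ∀ c ∈ pvCuts xs, 0 ≤ c := by rw [pvCuts_eq]; exact pvCutsFrom_nonneg xs 0
    unfold pvBlocksOf at ih ⊢
    rw [pvZipAux] at ih ⊢
    have hc : pvCuts (x :: xs) = (if pvSep x then [(0 : Int)] else []) ++ (pvCuts xs).map (· + 1) := by
      rw [pvCuts_eq, pvCuts_eq, pvCutsFrom_cons, pvCutsFrom_shift]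
    rw [hc]
    by_cases hs : pvSep x = true
    · simp only [hs, if_pos, List.cons_append, List.nil_append, pvAux, pvSplitL]
      have h0 : PySem.List.slice (x :: xs) (some (-1 + 1)) (some 0) = [] := by
        norm_num
        rw [PySem.List.slice_to (x :: xs) le_rfl]
        simp
      rw [h0]
      have h1 : pvAux (x :: xs) 0 ((pvCuts xs).map (· + 1)) = pvAux xs (-1) (pvCuts xs) := by
        have := pvAuxShift x xs (pvCuts xs) (-1) (by norm_num) hnn
        norm_num at this
        exact this
      rw [h1, ih]
    · simp only [hs, if_neg, Bool.false_eq_true, not_false_iff, List.nil_append, pvSplitL]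
      rw [← ih]
      cases hcc : pvCuts xs with
      | nil =>
        simp only [List.map_nil, pvAux]
        have hl : ((x :: xs).length : Int) = (xs.length : Int) + 1 := by simp
        rw [hl]
        norm_num
        rw [pvSliceHead x xs (xs.length : Int) (by positivity)]
        simp
      | cons c cs =>
        have hc0 : 0 ≤ c := hnn c (by rw [hcc]; exact List.mem_cons_self ..)
        have hcs0 : ∀ d ∈ cs, 0 ≤ d := fun d hd => hnn d (by rw [hcc]; exact List.mem_cons_of_mem _ hd)
        simp only [List.map_cons, pvAux]
        norm_num
        rw [pvSliceHead x xs c hc0]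
        rw [pvAuxShift x xs cs c (by omega) hcs0]
        simp

-- Python's max(blocks, key=len) on a nonempty list is the earliest-max left fold
theorem pvMaxD (h : List String) (t : List (List String)) :
    PySem.List.maxD (h :: t) (fun b => b.length) [] = (h :: t).foldl pvPick [] := by
  have key : ∀ (t : List (List String)) (a : List String),
      PySem.List.max? (a :: t) (fun b => b.length) = some (t.foldl pvPick a) := by
    intro t
    induction t with
    | nil => intro a; rfl
    | cons x xs ih =>
      intro a
      have h1 : PySem.List.max? (a :: x :: xs) (fun b => b.length)
          = PySem.List.max? (pvPick a x :: xs) (fun b => b.length) := by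
        unfold PySem.List.max? pvPick
        simp only [List.foldl_cons]
        congr 1
        simp only [gt_iff_lt]
        exact (apply_ite some _ _ _).symm
      rw [h1, ih]
      rfl
  unfold PySem.List.maxD
  rw [key]
  simp only [Option.getD_some, List.foldl_cons]
  congr 1
  unfold pvPick
  cases h <;> simp

-- ===== VERDICT (by name: the statement is the Claim_ definition above) =====
theorem extract_largest_code_block_py_spec : Claim_equal_extract_largest_code_block_py := by
  intro response _
  unfold Spec_extract_largest_code_block_py extract_largest_code_block_py extract_largest_code_block_py_alt
  refine congrArg (fun L => PySem.Str.strip (PySem.Str.join "\n" L)) ?_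
  have h := pvMain ((PySem.Str.split? response "\n").getD []) [] []
  simp only [List.foldl_nil] at h
  obtain ⟨bh, bt, hb⟩ : ∃ bh bt,
      pvSplitL (((PySem.Str.split? response "\n").getD []).filter (fun x => !pvFence x)) = bh :: bt := by
    cases hsp : pvSplitL (((PySem.Str.split? response "\n").getD []).filter (fun x => !pvFence x)) with
    | nil => exact absurd hsp (pvSplitL_ne_nil _)
    | cons a t => exact ⟨a, t, rfl⟩
  have e1 : ((((PySem.Str.split? response "\n").getD []).foldl pvStepB ([], [])).1
        ++ [(((PySem.Str.split? response "\n").getD []).foldl pvStepB ([], [])).2]).foldl pvPick []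
      = PySem.List.maxD (pvBlocksOf (((PySem.Str.split? response "\n").getD []).filter (fun l => !pvFence l)))
          (fun b => b.length) [] := by
    rw [pvFilter, pvFoldS, pvBlocksOf_eq, hb, pvMaxD]
    simp [pvPreApp, List.modifyHead]
  exact h.trans e1
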